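-- pv_equiv track=rewrite | github.com/ShreyaKapoor18/Thesis | graphtools/metrics.py | diag_flattened_indices
-- ===== SOURCE A (Python) =====
-- def diag_flattened_indices(a):
--     '''
--     Flattened array contains the upper diagonal matrix and we need to get the indices
--     in the flattened array which correspond to the diagonal elements
--     This returns only the diagonal elements
--     @param n: the shape of the array
--     @return:
--     '''
--     indices = []
--     i = a
--     n = 0
--     while n < (a * (a + 1)) / 2:
--         indices.append(n)
--         n += i
--         i -= 1
--     return indices
-- ===== SOURCE B (Python) =====
-- def diag_flattened_indices(a):
--     # closed form: the k-th diagonal element sits at k*a - k*(k-1)//2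
--     return [k * a - k * (k - 1) // 2 for k in range(a)]
-- ===== Notes on version B (the rewrite author's own statement) =====
-- stated objective: simpler
-- what changed: Replaces the sequential while-loop with running accumulator n and decreasing step i by a direct per-index closed form k*a - k*(k-1)//2 over range(a).
-- outside the precondition, e.g. on diag_flattened_indices(-2): A does not finish within the time limit, B returns []
import Mathlib
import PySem

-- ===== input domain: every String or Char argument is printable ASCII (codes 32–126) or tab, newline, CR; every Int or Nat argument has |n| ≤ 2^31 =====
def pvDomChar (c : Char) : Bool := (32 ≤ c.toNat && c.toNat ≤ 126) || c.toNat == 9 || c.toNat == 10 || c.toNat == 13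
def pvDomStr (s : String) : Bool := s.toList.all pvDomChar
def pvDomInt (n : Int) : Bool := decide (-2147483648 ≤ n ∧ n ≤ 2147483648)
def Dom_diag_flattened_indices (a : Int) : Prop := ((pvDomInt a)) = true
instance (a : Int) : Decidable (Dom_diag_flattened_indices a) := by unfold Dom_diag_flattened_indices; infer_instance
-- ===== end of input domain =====

-- B replaces A's sequential while-loop (accumulator n, decreasing step i) by the
-- per-index closed form k*a - k*(k-1)//2 over range(a); objective: simpler.

-- ===== PORT A =====
-- Python's `(a*(a+1))/2` is FLOAT division: the integer a*(a+1) is first rounded to a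
-- double (round-to-nearest-even, 53-bit significand), then halved exactly; the int-vs-
-- float comparison `n < …/2` is exact in Python, so it is `2*n < round(a*(a+1))`.
-- pvRoundFloat models that rounding exactly for 0 ≤ m < 2^63 (here m = a*(a+1) ≥ 0).
def pvRoundFloat (m : Int) : Int :=
  let mn := m.toNat
  if mn ≤ 2 ^ 53 then m
  else
    let e := mn.log2 - 52
    let q := mn / 2 ^ e
    let r := mn % 2 ^ e
    let h := 2 ^ (e - 1)
    if h < r ∨ (r = h ∧ q % 2 = 1) then (((q + 1) * 2 ^ e : Nat) : Int)
    else ((q * 2 ^ e : Nat) : Int)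

-- the while loop, with fuel making the recursion total (inside Pre_ the loop runs
-- exactly max(a,0) times, so the fuel a.toNat + 2 is never exhausted there)
def pvLoopA (a : Int) : Nat → Int → Int → List Int → List Int
  | 0, _, _, acc => acc
  | fuel + 1, i, n, acc =>
    if 2 * n < pvRoundFloat (a * (a + 1)) then
      pvLoopA a fuel (i - 1) (n + i) (acc ++ [n])
    else acc

def diag_flattened_indices (a : Int) : List Int :=
  pvLoopA a (a.toNat + 2) a 0 []

-- ===== PORT B =====
def diag_flattened_indices_alt (a : Int) : List Int :=
  (PySem.List.pyRange 0 a 1).map (fun k => k * a - PySem.Int.floordiv (k * (k - 1)) 2)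

-- ===== PRECONDITION & SPEC =====
-- Pre_ excludes a ≤ -2, where A's loop never terminates (n only decreases), and
-- a with a*(a+1) > 2^53, where the float bound (a*(a+1))/2 is no longer exact and the
-- loop either diverges (bound rounded up) or drops trailing indices (rounded down).
def Pre_diag_flattened_indices (a : Int) : Prop := -1 ≤ a ∧ a * (a + 1) ≤ 2 ^ 53
instance (a : Int) : Decidable (Pre_diag_flattened_indices a) := by
  unfold Pre_diag_flattened_indices; infer_instance

def pvWitness_diag_flattened_indices : Int := (4)

def Spec_diag_flattened_indices (a : Int) (out : List Int) : Prop := out = diag_flattened_indices_alt a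
instance (a : Int) (out : List Int) : Decidable (Spec_diag_flattened_indices a out) := by unfold Spec_diag_flattened_indices; infer_instance

-- ===== CLAIM (what is proved, stated in full; the proofs are below) =====
def Claim_equal_diag_flattened_indices : Prop := ∀ (a : Int), Dom_diag_flattened_indices a → Pre_diag_flattened_indices a → Spec_diag_flattened_indices a (diag_flattened_indices a)

-- ===== LEMMAS AND PROOFS =====

-- inside Pre_ the product is at most 2^53, so the double is exact
lemma pvRoundFloat_eq_of_le (m : Int) (h : m ≤ 2 ^ 53) : pvRoundFloat m = m := by
  have hmn : m.toNat ≤ 2 ^ 53 := by omega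
  simp only [pvRoundFloat]
  rw [if_pos hmn]

-- k*(k-1) is even, so Python's // 2 is exact halving
lemma pvHalf_spec (k : Int) : 2 * PySem.Int.floordiv (k * (k - 1)) 2 = k * (k - 1) := by
  rw [PySem.Int.floordiv_eq_ediv_of_pos (by norm_num)]
  obtain ⟨t, ht⟩ : Even (k * (k - 1)) := Int.even_mul_pred_self k
  have : k * (k - 1) = 2 * t := by omega
  rw [this, Int.mul_ediv_cancel_left _ (by norm_num)]

-- loop invariant: at step k (0 ≤ k ≤ a) the state is i = a - k, n = k*a - k*(k-1)//2,
-- and the remaining iterations append exactly the closed-form values for k, …, a-1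
lemma pvLoopA_inv (a : Int) (ha : 0 ≤ a) (hb : a * (a + 1) ≤ 2 ^ 53) :
    ∀ (fuel : Nat) (k : Int) (acc : List Int), 0 ≤ k → k ≤ a → (a - k).toNat < fuel →
      pvLoopA a fuel (a - k) (k * a - PySem.Int.floordiv (k * (k - 1)) 2) acc
        = acc ++ (PySem.List.pyRange k a 1).map
            (fun j => j * a - PySem.Int.floordiv (j * (j - 1)) 2) := by
  intro fuel
  induction fuel with
  | zero => intro k acc _ _ hf; omega
  | succ m ih =>
    intro k acc hk0 hka hf
    rw [pvLoopA, pvRoundFloat_eq_of_le _ hb]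
    have hdk := pvHalf_spec k
    rcases lt_or_eq_of_le hka with hlt | heq
    · have hcond : 2 * (k * a - PySem.Int.floordiv (k * (k - 1)) 2) < a * (a + 1) := by
        nlinarith [mul_pos (show (0:ℤ) < a - k by omega) (show (0:ℤ) < a - k + 1 by omega)]
      rw [if_pos hcond, PySem.List.pyRange_one_cons hlt, List.map_cons]
      have hdk1 := pvHalf_spec (k + 1)
      have hstep : k * a - PySem.Int.floordiv (k * (k - 1)) 2 + (a - k)
          = (k + 1) * a - PySem.Int.floordiv ((k + 1) * (k + 1 - 1)) 2 := by
        have e : (k + 1) * (k + 1 - 1) = k * (k - 1) + 2 * k := by ring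
        have e2 : (k + 1) * a = k * a + a := by ring
        nth_rewrite 2 [e] at hdk1
        omega
      have := ih (k + 1) (acc ++ [k * a - PySem.Int.floordiv (k * (k - 1)) 2])
        (by omega) (by omega) (by omega)
      rw [show a - k - 1 = a - (k + 1) by ring, hstep, this, List.append_assoc,
        List.singleton_append]
    · subst heq
      have hcond : ¬ 2 * (k * k - PySem.Int.floordiv (k * (k - 1)) 2) < k * (k + 1) := by
        have e : k * (k + 1) = k * (k - 1) + 2 * k := by ring
        have e3 : k * (k - 1) = k * k - k := by ring
        omega
      rw [if_neg hcond, PySem.List.pyRange_one_eq_nil (le_refl k), List.map_nil,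
        List.append_nil]

-- ===== VERDICT (by name: the statement is the Claim_ definition above) =====
theorem diag_flattened_indices_spec : Claim_equal_diag_flattened_indices := by
  intro a _ hpre
  obtain ⟨h1, h2⟩ := hpre
  unfold Spec_diag_flattened_indices diag_flattened_indices diag_flattened_indices_alt
  by_cases hneg : a < 0
  · have : a = -1 := by omega
    subst this; decide
  · have hpos : 0 ≤ a := by omega
    have hz : PySem.Int.floordiv ((0 : ℤ) * (0 - 1)) 2 = 0 := by
      have := pvHalf_spec 0
      simp only [show ((0:ℤ) * (0 - 1)) = 0 by ring] at this ⊢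
      omega
    have := pvLoopA_inv a hpos h2 (a.toNat + 2) 0 [] (le_refl 0) hpos (by omega)
    simpa [hz] using this
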